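-- pv_equiv track=rewrite | github.com/deezer/MusicGenreTranslation | tag_translation/kb/trie.py | _get_valid_tokenization_for_start_with_unknown
-- ===== SOURCE A (Python) =====
-- def _get_valid_tokenization_for_start_with_unknown(tokens):
--     """
--         Returns a list of valid tokens for the case when the first token is unknown
--
--         The idea is that unknown tokens before known tokens are considered as relevant
--         and are stored as standalone concepts
--     """
--     valid_tokens = []
--
--     # If the last tokens are unknow append them to the last known token as suffix
--     last_unknown = ''
--     for token, known in tokens:
--         if known:
--             if last_unknown != '':
--                 valid_tokens.append(last_unknown)
--                 last_unknown = ''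
--
--             valid_tokens.append(token)
--         else:
--             last_unknown += token
--
--     # Check for situations like Unknown+
--     if len(valid_tokens) == 0:
--         valid_tokens.append(last_unknown)
--     # Check for situation like (Uknown+ Known+)+ Unknown+
--     elif len(tokens) >= 2 and not tokens[-1][1]:
--         valid_tokens[-1] += last_unknown
--
--     return valid_tokens
-- ===== SOURCE B (Python) =====
-- def _get_valid_tokenization_for_start_with_unknown(tokens):
--     # Phase 1: group consecutive tokens by their 'known' flag.
--     groups = []
--     for token, known in tokens:
--         if groups and groups[-1][0] == known:
--             groups[-1][1].append(token)
--         else: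
--             groups.append((known, [token]))
--     # Phase 2: emit.
--     out = []
--     for i, (known, toks) in enumerate(groups):
--         if known:
--             out.extend(toks)
--         else:
--             joined = ''.join(toks)
--             if i == len(groups) - 1:
--                 if not out:
--                     out.append(joined)
--                 else:
--                     out[-1] += joined
--             elif joined != '':
--                 out.append(joined)
--     if not out:
--         out.append('')
--     return out
-- ===== Notes on version B (the rewrite author's own statement) =====
-- stated objective: alternative
-- what changed: Replaces the single running-accumulator pass (valid_tokens + last_unknown string) with a two-phase structure: first materialize runs of tokens grouped by their known flag, then emit groups, treating only the final unknown group specially.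
import Mathlib
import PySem

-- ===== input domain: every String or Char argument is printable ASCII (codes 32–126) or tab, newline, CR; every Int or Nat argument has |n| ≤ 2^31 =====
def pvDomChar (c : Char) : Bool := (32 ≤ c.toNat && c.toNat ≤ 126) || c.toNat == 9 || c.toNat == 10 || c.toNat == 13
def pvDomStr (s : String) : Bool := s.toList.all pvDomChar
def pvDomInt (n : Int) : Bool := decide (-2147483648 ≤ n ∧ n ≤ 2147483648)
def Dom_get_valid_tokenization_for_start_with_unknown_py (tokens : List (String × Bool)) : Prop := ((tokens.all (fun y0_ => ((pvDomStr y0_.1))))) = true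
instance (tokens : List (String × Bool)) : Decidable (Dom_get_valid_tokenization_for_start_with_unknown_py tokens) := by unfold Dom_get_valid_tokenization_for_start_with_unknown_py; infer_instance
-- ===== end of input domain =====

-- B is an alternative decomposition of the same O(n) task: build runs of tokens grouped
-- by the `known` flag first, then emit the groups; return values are proved identical.

-- ===== PORT A =====
-- loop body: flush `last_unknown` before a known token, else accumulate it
def pvStepA (st : List String × String) (tk : String × Bool) : List String × String :=
  if tk.2 then
    ((if st.2 ≠ "" then st.1 ++ [st.2] else st.1) ++ [tk.1],
     if st.2 ≠ "" then "" else st.2)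
  else (st.1, st.2 ++ tk.1)

def get_valid_tokenization_for_start_with_unknown_py (tokens : List (String × Bool)) : List String :=
  let st := tokens.foldl pvStepA ([], "")
  if st.1.length = 0 then st.1 ++ [st.2]
  else if 2 ≤ tokens.length ∧ (PySem.List.pyGet? tokens (-1)).map Prod.snd = some false then
    st.1.dropLast ++ [st.1.getLast?.getD "" ++ st.2]
  else st.1

-- ===== PORT B =====
-- phase 1 loop body: extend the last run, or start a new one
def pvStepG (gs : List (Bool × List String)) (tk : String × Bool) : List (Bool × List String) :=
  match gs.getLast? with
  | some g => if g.1 = tk.2 then gs.dropLast ++ [(g.1, g.2 ++ [tk.1])] else gs ++ [(tk.2, [tk.1])]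
  | none => [(tk.2, [tk.1])]

def pvGroups (tokens : List (String × Bool)) : List (Bool × List String) :=
  tokens.foldl pvStepG []

-- phase 2 loop body (n = number of groups, p = (index, (known, toks)))
def pvEmit (n : Nat) (out : List String) (p : Int × (Bool × List String)) : List String :=
  if p.2.1 then out ++ p.2.2
  else
    let joined := PySem.Str.join "" p.2.2
    if p.1 = (n : Int) - 1 then
      (if out = [] then out ++ [joined] else out.dropLast ++ [out.getLast?.getD "" ++ joined])
    else if joined ≠ "" then out ++ [joined] else out

def get_valid_tokenization_for_start_with_unknown_py_alt (tokens : List (String × Bool)) : List String :=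
  let groups := pvGroups tokens
  let out := (PySem.List.enumerate groups).foldl (pvEmit groups.length) []
  if out = [] then out ++ [""] else out

-- ===== PRECONDITION & SPEC =====
def Spec_get_valid_tokenization_for_start_with_unknown_py (tokens : List (String × Bool)) (out : List String) : Prop := out = get_valid_tokenization_for_start_with_unknown_py_alt tokens
instance (tokens : List (String × Bool)) (out : List String) : Decidable (Spec_get_valid_tokenization_for_start_with_unknown_py tokens out) := by unfold Spec_get_valid_tokenization_for_start_with_unknown_py; infer_instance

-- ===== CLAIM (what is proved, stated in full; the proofs are below) =====
def Claim_equal_get_valid_tokenization_for_start_with_unknown_py : Prop := ∀ (tokens : List (String × Bool)), Dom_get_valid_tokenization_for_start_with_unknown_py tokens → Spec_get_valid_tokenization_for_start_with_unknown_py tokens (get_valid_tokenization_for_start_with_unknown_py tokens)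

-- ===== LEMMAS AND PROOFS =====

-- what phase 2 emits for a NON-last group
def pvEmit1 (g : Bool × List String) : List String :=
  if g.1 then g.2 else if PySem.Str.join "" g.2 ≠ "" then [PySem.Str.join "" g.2] else []

def pvEmitMid (gs : List (Bool × List String)) : List String := gs.flatMap pvEmit1

lemma pvIntercalate_nil (l : List (List Char)) : ([] : List Char).intercalate l = l.flatten := by
  induction l with
  | nil => simp [List.intercalate]
  | cons a l ih =>
    cases l with
    | nil => simp [List.intercalate]
    | cons b m => simp_all [List.intercalate, List.intersperse]

lemma pvJoin_snoc (ts : List String) (t : String) :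
    PySem.Str.join "" (ts ++ [t]) = PySem.Str.join "" ts ++ t := by
  simp [PySem.Str.join, PySem.Chars.join, pvIntercalate_nil, String.ofList_append]

lemma pvJoin_singleton (t : String) : PySem.Str.join "" [t] = t := by
  simp [PySem.Str.join, PySem.Chars.join, List.intercalate]

lemma pvEmitMid_append (gs hs : List (Bool × List String)) :
    pvEmitMid (gs ++ hs) = pvEmitMid gs ++ pvEmitMid hs := by
  simp [pvEmitMid]

-- the phase-2 fold over all but the last group behaves like pvEmitMid
lemma pvEmitFold_mid (init : List (Bool × List String)) (n : Nat) (hn : init.length < n) :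
    (PySem.List.enumerate init).foldl (pvEmit n) [] = pvEmitMid init := by
  have h1 : (PySem.List.enumerate init).foldl (pvEmit n) [] =
      (PySem.List.enumerate init).foldl (fun out p => out ++ pvEmit1 p.2) [] := by
    apply PySem.List.foldl_congr_mem
    intro acc p hp
    rcases (PySem.List.mem_enumerate_iff init 0 p).mp hp with ⟨k, hk, rfl⟩
    have hne : (0 : Int) + k ≠ (n : Int) - 1 := by omega
    simp only [pvEmit, pvEmit1]
    split
    · rfl
    · split <;> simp_all
  rw [h1, PySem.List.foldl_append_eq_flatMap]
  conv_rhs => rw [pvEmitMid, ← PySem.List.map_snd_enumerate init (0 : Int)]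
  rw [List.flatMap_map]
  rfl

-- the loop invariant tying A's running state to B's groups
def pvInvP (tokens : List (String × Bool)) : Prop :=
  let st := tokens.foldl pvStepA ([], "")
  let gs := pvGroups tokens
  (∀ g ∈ gs, g.2 ≠ []) ∧ gs.length ≤ tokens.length ∧
  ((gs.getLast?).map Prod.fst = (tokens.getLast?).map Prod.snd) ∧
  ((gs = [] ∧ st.1 = [] ∧ st.2 = "") ∨
   (∃ init ts, gs = init ++ [(true, ts)] ∧ st.1 = pvEmitMid gs ∧ st.2 = "") ∨
   (∃ init ts, gs = init ++ [(false, ts)] ∧ st.1 = pvEmitMid init ∧ st.2 = PySem.Str.join "" ts))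

lemma pvInv (tokens : List (String × Bool)) : pvInvP tokens := by
  induction tokens using List.reverseRecOn with
  | nil => simp [pvInvP, pvGroups]
  | append_singleton xs tk ih =>
    obtain ⟨t, k⟩ := tk
    simp only [pvInvP, pvGroups, List.foldl_append, List.foldl_cons, List.foldl_nil] at ih ⊢
    obtain ⟨hne, hlen, hflag, hcase⟩ := ih
    rcases hst : List.foldl pvStepA ([], "") xs with ⟨v, lu⟩
    rw [hst] at hcase
    rcases hcase with ⟨hgs, hv, hlu⟩ | ⟨init, ts, hgs, hv, hlu⟩ | ⟨init, ts, hgs, hv, hlu⟩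
    · -- no groups yet: the new token opens the first group
      subst hv hlu
      rw [hgs] at hne hlen ⊢
      have hstep : pvStepG [] (t, k) = [(k, [t])] := rfl
      rw [hstep]
      cases k
      · exact ⟨by simp, by simp, by simp,
          Or.inr (Or.inr ⟨[], [t], by simp, by simp [pvStepA, pvEmitMid],
            by simp [pvStepA, pvJoin_singleton]⟩)⟩
      · exact ⟨by simp, by simp, by simp,
          Or.inr (Or.inl ⟨[], [t], by simp,
            by simp [pvStepA, pvEmitMid, pvEmit1], by simp [pvStepA]⟩)⟩
    · -- last group known
      subst hv hlu
      rw [hgs] at hne hlen ⊢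
      cases k
      · -- unknown token: open a new unknown group
        have hstep : pvStepG (init ++ [(true, ts)]) (t, false)
            = (init ++ [(true, ts)]) ++ [(false, [t])] := by simp [pvStepG]
        rw [hstep]
        refine ⟨?_, by simp at hlen ⊢; omega, by simp,
          Or.inr (Or.inr ⟨init ++ [(true, ts)], [t], rfl,
            by simp [pvStepA], by simp [pvStepA, pvJoin_singleton]⟩)⟩
        intro g hg
        rcases List.mem_append.mp hg with h | h
        · exact hne g h
        · simp_all
      · -- known token: append to the known group
        have hstep : pvStepG (init ++ [(true, ts)]) (t, true)
            = init ++ [(true, ts ++ [t])] := by simp [pvStepG]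
        rw [hstep]
        refine ⟨?_, by simp at hlen ⊢; omega, by simp,
          Or.inr (Or.inl ⟨init, ts ++ [t], rfl,
            by simp [pvStepA, pvEmitMid, pvEmit1],
            by simp [pvStepA]⟩)⟩
        intro g hg
        rcases List.mem_append.mp hg with h | h
        · exact hne g (List.mem_append.mpr (Or.inl h))
        · simp_all
    · -- last group unknown
      subst hv hlu
      rw [hgs] at hne hlen ⊢
      cases k
      · -- unknown token: extend the unknown group
        have hstep : pvStepG (init ++ [(false, ts)]) (t, false)
            = init ++ [(false, ts ++ [t])] := by simp [pvStepG]
        rw [hstep]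
        refine ⟨?_, by simp at hlen ⊢; omega, by simp,
          Or.inr (Or.inr ⟨init, ts ++ [t], rfl,
            by simp [pvStepA], by simp [pvStepA, pvJoin_snoc]⟩)⟩
        intro g hg
        rcases List.mem_append.mp hg with h | h
        · exact hne g (List.mem_append.mpr (Or.inl h))
        · simp_all
      · -- known token: flush the pending unknown text, open a new known group
        have hstep : pvStepG (init ++ [(false, ts)]) (t, true)
            = (init ++ [(false, ts)]) ++ [(true, [t])] := by simp [pvStepG]
        rw [hstep]
        refine ⟨?_, by simp at hlen ⊢; omega, by simp,
          Or.inr (Or.inl ⟨init ++ [(false, ts)], [t], rfl, ?_, ?_⟩)⟩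
        · intro g hg
          rcases List.mem_append.mp hg with h | h
          · exact hne g h
          · simp_all
        · by_cases h : PySem.Str.join "" ts = "" <;>
            simp [pvStepA, h, pvEmitMid, pvEmit1]
        · by_cases h : PySem.Str.join "" ts = "" <;> simp [pvStepA, h]

-- ===== VERDICT (by name: the statement is the Claim_ definition above) =====
theorem get_valid_tokenization_for_start_with_unknown_py_spec : Claim_equal_get_valid_tokenization_for_start_with_unknown_py := by
  intro tokens _
  show _ = _
  obtain ⟨hne, hlen, hflag, hcase⟩ := pvInv tokens
  simp only [get_valid_tokenization_for_start_with_unknown_py,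
    get_valid_tokenization_for_start_with_unknown_py_alt]
  rcases hcase with ⟨hgs, hv, hlu⟩ | ⟨init, ts, hgs, hv, hlu⟩ | ⟨init, ts, hgs, hv, hlu⟩
  · simp [pvGroups] at hgs ⊢
    simp [hgs, hv, hlu]
  · -- last group known: neither final fix-up fires
    have hts : ts ≠ [] := hne (true, ts) (by rw [hgs]; simp)
    have hlast : tokens.getLast?.map Prod.snd = some true := by
      rw [← hflag, hgs]; simp
    have hcond : ¬ (2 ≤ tokens.length ∧
        (PySem.List.pyGet? tokens (-1)).map Prod.snd = some false) := by
      rintro ⟨-, h⟩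
      rw [PySem.List.pyGet?_neg_one, hlast] at h
      simp at h
    have hout : (PySem.List.enumerate (pvGroups tokens)).foldl
        (pvEmit (pvGroups tokens).length) [] = pvEmitMid init ++ ts := by
      rw [hgs, PySem.List.enumerate_append, List.foldl_append,
        pvEmitFold_mid init _ (by simp)]
      simp [PySem.List.enumerate, pvEmit]
    have hv' : (tokens.foldl pvStepA ([], "")).1 = pvEmitMid init ++ ts := by
      rw [hv, hgs, pvEmitMid_append]; simp [pvEmitMid, pvEmit1]
    rw [hout, hv']
    have hne0 : pvEmitMid init ++ ts ≠ [] := by simp [hts]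
    have hl0 : ¬ ((pvEmitMid init ++ ts).length = 0) := by simp [hts]
    rw [if_neg hl0, if_neg hcond, if_neg hne0]
  · -- last group unknown: the trailing unknown text is folded into the last item
    have hout : (PySem.List.enumerate (pvGroups tokens)).foldl
        (pvEmit (pvGroups tokens).length) [] =
        (if pvEmitMid init = [] then [PySem.Str.join "" ts]
         else (pvEmitMid init).dropLast ++
           [((pvEmitMid init).getLast?.getD "") ++ PySem.Str.join "" ts]) := by
      rw [hgs, PySem.List.enumerate_append, List.foldl_append,
        pvEmitFold_mid init _ (by simp)]
      simp only [PySem.List.enumerate, List.foldl_cons, List.foldl_nil, pvEmit]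
      split_ifs with h1 h2 <;> simp_all
    have hlast : tokens.getLast?.map Prod.snd = some false := by
      rw [← hflag, hgs]; simp
    by_cases hv0 : pvEmitMid init = []
    · rw [hout, if_pos hv0, hv, hlu, hv0]
      simp
    · have hinit : init ≠ [] := by
        intro h; exact hv0 (by simp [h, pvEmitMid])
      have h2 : 2 ≤ tokens.length := by
        have hg2 : 2 ≤ (pvGroups tokens).length := by
          rw [hgs]
          have := List.length_pos_iff.mpr hinit
          simp
          omega
        omega
      have hcond : 2 ≤ tokens.length ∧
          (PySem.List.pyGet? tokens (-1)).map Prod.snd = some false :=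
        ⟨h2, by rw [PySem.List.pyGet?_neg_one, hlast]⟩
      rw [hout, if_neg hv0, hv, hlu]
      have hl0 : ¬ ((pvEmitMid init).length = 0) := by
        simpa [List.length_eq_zero_iff] using hv0
      have hne0 : (pvEmitMid init).dropLast ++
          [(pvEmitMid init).getLast?.getD "" ++ PySem.Str.join "" ts] ≠ [] := by simp
      rw [if_neg hl0, if_pos hcond, if_neg hne0]
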